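-- pv_equiv track=rewrite | github.com/ryota-sugimoto/palmsite | scripts/unused/label_from_rdrpcatch_pfam_palmannot.py | summarize_model_coverage
-- ===== SOURCE A (Python) =====
-- from typing import Dict, Iterable, Iterator, List, Optional, Sequence, Tuple
--
-- def merge_intervals(iv: Sequence[Tuple[int, int]], max_gap: int = 0) -> List[Tuple[int, int]]:
--     if not iv:
--         return []
--     arr = sorted(iv, key=lambda x: (x[0], x[1]))
--     out: List[Tuple[int, int]] = [arr[0]]
--     for s, e in arr[1:]:
--         ps, pe = out[-1]
--         if s <= pe + max_gap:
--             out[-1] = (ps, max(pe, e))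
--         else:
--             out.append((s, e))
--     return out
--
-- def union_len(iv: Sequence[Tuple[int, int]]) -> int:
--     return sum(max(0, e - s) for s, e in merge_intervals(iv, max_gap=0))
--
-- def summarize_model_coverage(model_to_intervals: Dict[str, List[Tuple[int, int]]], topn: int = 8) -> str:
--     if not model_to_intervals:
--         return ""
--     pairs = []
--     for model, iv in model_to_intervals.items():
--         cov = union_len(iv)
--         pairs.append((model, cov))
--     pairs.sort(key=lambda x: (-x[1], x[0]))
--     shown = pairs[:topn]
--     return ",".join(f"{m}:{cov}" for m, cov in shown)
-- ===== SOURCE B (Python) =====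
-- def _coverage(iv):
--     # single pass over the sorted intervals: 'reach' is the furthest end seen,
--     # each interval contributes only the part beyond max(its start, reach).
--     total = 0
--     reach = None
--     for s, e in sorted(iv):
--         if reach is None:
--             reach = s
--         total += max(0, e - max(s, reach))
--         reach = max(reach, e)
--     return total
--
-- def summarize_model_coverage(model_to_intervals, topn=8):
--     pairs = sorted(((m, _coverage(iv)) for m, iv in model_to_intervals.items()),
--                    key=lambda x: (-x[1], x[0]))
--     return ",".join("%s:%d" % p for p in pairs[:topn])
-- ===== Notes on version B (the rewrite author's own statement) =====
-- stated objective: simpler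
-- what changed: union_len's build-merged-interval-list-then-sum (and the helper merge_intervals plus the empty-dict early return) is replaced by a single fold over the sorted intervals that keeps only a running total and the furthest end reached, adding each interval's part beyond max(start, reach).
import Mathlib
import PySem

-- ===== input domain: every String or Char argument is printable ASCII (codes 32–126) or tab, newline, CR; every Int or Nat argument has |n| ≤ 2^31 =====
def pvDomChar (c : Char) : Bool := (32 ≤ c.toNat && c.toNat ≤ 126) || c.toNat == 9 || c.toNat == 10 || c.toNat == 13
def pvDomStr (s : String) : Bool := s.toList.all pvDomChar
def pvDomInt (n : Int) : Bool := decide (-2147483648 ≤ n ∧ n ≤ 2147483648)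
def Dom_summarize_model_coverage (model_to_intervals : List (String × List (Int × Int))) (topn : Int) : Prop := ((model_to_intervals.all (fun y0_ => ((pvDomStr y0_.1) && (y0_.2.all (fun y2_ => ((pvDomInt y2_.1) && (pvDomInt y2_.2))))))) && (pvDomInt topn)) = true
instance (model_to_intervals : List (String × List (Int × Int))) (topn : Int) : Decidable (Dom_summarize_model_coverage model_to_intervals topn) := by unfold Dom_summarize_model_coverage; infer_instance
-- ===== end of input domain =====

-- B replaces A's merge-intervals-then-sum union length by a single fold over the
-- sorted intervals that keeps only a running total and the furthest end reached
-- (objective: simpler — no merged-interval list, no helper, no empty-dict guard).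

-- ===== PORT A =====
def merge_intervals (iv : List (Int × Int)) (max_gap : Int) : List (Int × Int) :=
  if iv = [] then []
  else
    let arr := PySem.List.sorted2 iv (fun x => x.1) (fun x => x.2)
    (PySem.List.slice arr (some 1) none).foldl
      (fun out se =>
        let p := PySem.List.pyGetD out (-1) ((0 : Int), (0 : Int))
        if se.1 ≤ p.2 + max_gap then out.dropLast ++ [(p.1, max p.2 se.2)]
        else out ++ [(se.1, se.2)])
      [PySem.List.pyGetD arr 0 ((0 : Int), (0 : Int))]

def union_len (iv : List (Int × Int)) : Int :=
  ((merge_intervals iv 0).map (fun p => max 0 (p.2 - p.1))).sum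

def summarize_model_coverage (model_to_intervals : List (String × List (Int × Int))) (topn : Int) : String :=
  if model_to_intervals = [] then ""
  else
    let pairs := model_to_intervals.foldl
      (fun acc p => acc ++ [(p.1, union_len p.2)]) ([] : List (String × Int))
    let pairs2 := PySem.List.sorted2 pairs (fun x => -x.2) (fun x => x.1)
    let shown := PySem.List.slice pairs2 none (some topn)
    PySem.Str.join "," (shown.map (fun p => String.ofList (p.1.toList ++ ':' :: PySem.Int.toChars p.2)))

-- ===== PORT B =====
def coverage_alt (iv : List (Int × Int)) : Int :=
  ((PySem.List.sorted2 iv (fun x => x.1) (fun x => x.2)).foldl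
    (fun (st : Int × Option Int) se =>
      let r := st.2.getD se.1
      (st.1 + max 0 (se.2 - max se.1 r), some (max r se.2)))
    ((0 : Int), (none : Option Int))).1

def summarize_model_coverage_alt (model_to_intervals : List (String × List (Int × Int))) (topn : Int) : String :=
  let pairs := PySem.List.sorted2
    (model_to_intervals.map (fun p => (p.1, coverage_alt p.2)))
    (fun x => -x.2) (fun x => x.1)
  PySem.Str.join ","
    ((PySem.List.slice pairs none (some topn)).map
      (fun p => String.ofList (p.1.toList ++ ':' :: PySem.Int.toChars p.2)))

-- ===== PRECONDITION & SPEC =====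
def Spec_summarize_model_coverage (model_to_intervals : List (String × List (Int × Int))) (topn : Int) (out : String) : Prop := out = summarize_model_coverage_alt model_to_intervals topn
instance (model_to_intervals : List (String × List (Int × Int))) (topn : Int) (out : String) : Decidable (Spec_summarize_model_coverage model_to_intervals topn out) := by unfold Spec_summarize_model_coverage; infer_instance

-- ===== CLAIM (what is proved, stated in full; the proofs are below) =====
def Claim_equal_summarize_model_coverage : Prop := ∀ (model_to_intervals : List (String × List (Int × Int))) (topn : Int), Dom_summarize_model_coverage model_to_intervals topn → Spec_summarize_model_coverage model_to_intervals topn (summarize_model_coverage model_to_intervals topn)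

-- ===== LEMMAS AND PROOFS =====

-- insertBy with a `before` test that is sound for the first components keeps
-- the list pairwise-nondecreasing in the first component.
theorem insertBy_pairwise_fst (before : Int × Int → Int × Int → Bool)
    (hb : ∀ a b, before a b = true → a.1 ≤ b.1)
    (hb' : ∀ a b, before a b = false → b.1 ≤ a.1)
    (x : Int × Int) (ys : List (Int × Int))
    (h : ys.Pairwise (fun a b => a.1 ≤ b.1)) :
    (PySem.List.insertBy before x ys).Pairwise (fun a b => a.1 ≤ b.1) := by
  induction ys with
  | nil => simp [PySem.List.insertBy]
  | cons y ys ih =>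
    obtain ⟨hy, hys⟩ := List.pairwise_cons.mp h
    by_cases hxy : before x y = true
    · simp only [PySem.List.insertBy, hxy, if_true]
      refine List.Pairwise.cons ?_ (List.Pairwise.cons hy hys)
      intro z hz
      rcases List.mem_cons.mp hz with rfl | hz
      · exact hb _ _ hxy
      · exact le_trans (hb _ _ hxy) (hy _ hz)
    · simp only [PySem.List.insertBy, hxy]
      refine List.Pairwise.cons ?_ (ih hys)
      intro z hz
      rcases (PySem.List.mem_insertBy before x z ys).mp hz with rfl | hz
      · exact hb' _ _ (by simpa using hxy)
      · exact hy _ hz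

theorem foldl_insertBy_pairwise_fst (before : Int × Int → Int × Int → Bool)
    (hb : ∀ a b, before a b = true → a.1 ≤ b.1)
    (hb' : ∀ a b, before a b = false → b.1 ≤ a.1)
    (xs acc : List (Int × Int)) (hacc : acc.Pairwise (fun a b => a.1 ≤ b.1)) :
    (xs.foldl (fun acc x => PySem.List.insertBy before x acc) acc).Pairwise
      (fun a b => a.1 ≤ b.1) := by
  induction xs generalizing acc with
  | nil => simpa using hacc
  | cons x xs ih =>
    exact ih _ (insertBy_pairwise_fst before hb hb' x acc hacc)

-- the list A and B both sort is nondecreasing in the interval starts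
theorem sorted2_pairwise_fst (iv : List (Int × Int)) :
    (PySem.List.sorted2 iv (fun x => x.1) (fun x => x.2)).Pairwise
      (fun a b => a.1 ≤ b.1) := by
  unfold PySem.List.sorted2
  simp only [if_neg (by decide : ¬ (false = true))]
  apply foldl_insertBy_pairwise_fst
  · intro a b h
    rcases Bool.or_eq_true_iff.mp h with h1 | h2
    · exact le_of_lt (by simpa using h1)
    · have := Bool.and_eq_true_iff.mp h2
      have h3 : ¬ (b.1 < a.1) := by simpa using this.1
      omega
  · intro a b h
    have h1 : ¬ (a.1 < b.1) := by
      intro hlt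
      simp [hlt] at h
    omega
  · exact List.Pairwise.nil

-- Invariant linking A's merge fold (last merged interval (ps, pe) at the end of
-- `front`) with B's sweep fold (running total and furthest end `reach`).
theorem sweep_merge (l : List (Int × Int)) (front : List (Int × Int))
    (ps pe total reach : Int)
    (hs : ∀ x ∈ l, ps ≤ x.1)
    (hp : l.Pairwise (fun a b => a.1 ≤ b.1))
    (ht : total = ((front.map (fun p => max 0 (p.2 - p.1))).sum) + max 0 (reach - ps))
    (hbe : pe ≤ reach) (hc : reach = pe ∨ reach ≤ ps) :
    (((l.foldl
        (fun out se =>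
          let p := PySem.List.pyGetD out (-1) ((0 : Int), (0 : Int))
          if se.1 ≤ p.2 + 0 then out.dropLast ++ [(p.1, max p.2 se.2)]
          else out ++ [(se.1, se.2)])
        (front ++ [(ps, pe)])).map (fun p => max 0 (p.2 - p.1))).sum)
    = (l.foldl
        (fun (st : Int × Option Int) se =>
          let r := st.2.getD se.1
          (st.1 + max 0 (se.2 - max se.1 r), some (max r se.2)))
        (total, some reach)).1 := by
  induction l generalizing front ps pe total reach with
  | nil =>
    simp only [List.foldl_nil, List.map_append, List.sum_append, List.map_cons,
      List.map_nil, List.sum_cons, List.sum_nil, ht]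
    omega
  | cons x l ih =>
    have hx1 : ps ≤ x.1 := hs x (List.mem_cons_self)
    have hs' : ∀ y ∈ l, ps ≤ y.1 := fun y hy => hs y (List.mem_cons_of_mem _ hy)
    obtain ⟨hpx, hp'⟩ := List.pairwise_cons.mp hp
    simp only [List.foldl_cons, PySem.List.pyGetD_neg_one_append_singleton,
      List.dropLast_concat, Option.getD_some]
    by_cases hcase : x.1 ≤ pe + 0
    · simp only [if_pos hcase]
      exact ih front ps (max pe x.2)
        (total + max 0 (x.2 - max x.1 reach)) (max reach x.2)
        hs' hp' (by rw [ht]; omega) (by omega) (by omega)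
    · simp only [if_neg hcase]
      refine ih (front ++ [(ps, pe)]) x.1 x.2
        (total + max 0 (x.2 - max x.1 reach)) (max reach x.2)
        hpx hp' ?_ (by omega) (by omega)
      simp only [List.map_append, List.sum_append, List.map_cons, List.map_nil,
        List.sum_cons, List.sum_nil, ht]
      omega

-- A's union length equals B's one-pass coverage.
theorem union_len_eq_coverage_alt (iv : List (Int × Int)) :
    union_len iv = coverage_alt iv := by
  by_cases hiv : iv = []
  · subst hiv
    simp [union_len, coverage_alt, merge_intervals, PySem.List.sorted2]
  · have hperm := PySem.List.sorted2_perm iv (fun x => x.1) (fun x => x.2) false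
    have harr : PySem.List.sorted2 iv (fun x => x.1) (fun x => x.2) ≠ [] := by
      intro h
      exact hiv ((h ▸ hperm : ([] : List (Int × Int)).Perm iv).symm.eq_nil)
    have hpair := sorted2_pairwise_fst iv
    unfold union_len coverage_alt merge_intervals
    rw [if_neg hiv]
    rcases harr' : PySem.List.sorted2 iv (fun x => x.1) (fun x => x.2) with _ | ⟨a, t⟩
    · exact absurd harr' harr
    rw [harr'] at hpair
    obtain ⟨hhead, htail⟩ := List.pairwise_cons.mp hpair
    simp only [PySem.List.slice_from_one, List.tail_cons, PySem.List.pyGetD_zero,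
      List.getD_cons_zero, List.foldl_cons, Option.getD_none]
    have := sweep_merge t [] a.1 a.2
      (0 + max 0 (a.2 - max a.1 a.1)) (max a.1 a.2)
      hhead htail (by simp; omega) (by omega) (by omega)
    simpa using this

-- ===== VERDICT (by name: the statement is the Claim_ definition above) =====
theorem summarize_model_coverage_spec : Claim_equal_summarize_model_coverage := by
  intro mti topn _
  unfold Spec_summarize_model_coverage summarize_model_coverage summarize_model_coverage_alt
  by_cases h : mti = []
  · subst h
    simp [PySem.List.sorted2, PySem.List.slice]
    decide
  · rw [if_neg h]
    simp only [PySem.List.foldl_append_singleton_eq_map, List.nil_append,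
      union_len_eq_coverage_alt]
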